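-- pv_equiv track=rewrite | github.com/EricLee8/Multi-party-Dialogue-MRC | molweni/utils/utils.py | clean_answer
-- ===== SOURCE A (Python) =====
-- def clean_answer(s):
--     def _get_max_matched_str(tlist):
--         for length in range(1, len(tlist)):
--             if s[:length] == s[-length:]:
--                 return length
--         return -1
--
--     token_list = s.split(' ')
--     if len(token_list) > 20:
--         max_length = _get_max_matched_str(token_list)
--         if max_length == -1:
--             rtv = s
--         else:
--             rtv = " ".join(token_list[:max_length])
--         return rtv
--     return s
-- ===== SOURCE B (Python) =====
-- def clean_answer(s):
--     token_list = s.split(' ')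
--     if len(token_list) <= 20:
--         return s
--     n = len(s)
--     # prefix function (KMP failure table), built in one linear pass
--     pi = [0]
--     for i in range(1, n):
--         k = pi[i - 1]
--         while k > 0 and s[i] != s[k]:
--             k = pi[k - 1]
--         if s[i] == s[k]:
--             k += 1
--         pi.append(k)
--     # smallest non-zero border = last non-zero value on the border chain
--     b = pi[n - 1]
--     while b > 0 and pi[b - 1] > 0:
--         b = pi[b - 1]
--     if 0 < b < len(token_list):
--         return " ".join(token_list[:b])
--     return s
-- ===== Notes on version B (the rewrite author's own statement) =====
-- stated objective: faster
-- what changed: Replaces the per-candidate slice comparison (each candidate length L costs an O(L) prefix/suffix slice equality) by a single linear KMP prefix-function pass followed by a walk down the border chain to the smallest non-zero border.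
import Mathlib
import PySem

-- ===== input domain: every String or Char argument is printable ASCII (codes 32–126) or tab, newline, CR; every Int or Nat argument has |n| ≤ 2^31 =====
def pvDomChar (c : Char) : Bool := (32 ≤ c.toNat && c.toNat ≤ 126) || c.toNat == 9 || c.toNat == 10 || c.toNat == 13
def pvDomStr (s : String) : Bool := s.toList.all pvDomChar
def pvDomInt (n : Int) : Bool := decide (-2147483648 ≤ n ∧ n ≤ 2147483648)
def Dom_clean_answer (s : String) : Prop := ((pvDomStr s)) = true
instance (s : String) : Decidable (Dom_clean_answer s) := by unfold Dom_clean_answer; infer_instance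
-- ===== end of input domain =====

-- B replaces A's per-candidate prefix/suffix slice comparisons by a single linear KMP
-- prefix-function pass plus a walk down the border chain (objective: faster).

-- ===== PORT A =====
-- the inner 'for length in range(1, len(tlist)): if s[:length] == s[-length:]: return length / return -1'
def pvGetMax (s : String) : List Int → Int
  | [] => -1
  | L :: rest =>
    if PySem.Str.slice s none (some L) = PySem.Str.slice s (some (-L)) none then L
    else pvGetMax s rest

def clean_answer (s : String) : String :=
  let token_list := (PySem.Chars.splitOn s.toList " ".toList).map String.ofList
  if token_list.length > 20 then
    let max_length := pvGetMax s (PySem.List.pyRange 1 (token_list.length : Int) 1)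
    if max_length = -1 then s
    else PySem.Str.join " " (PySem.List.slice token_list none (some max_length))
  else s

-- ===== PORT B =====
-- 'while k > 0 and s[i] != s[k]: k = pi[k-1]'; fuel = the initial k (each step strictly
-- decreases k and pi[k-1] ≤ k-1, so the fuel is never exhausted; indices are always in range
-- in the Python, so getD's default is never read)
def pvShrink (cs : List Char) (pi : List Nat) (ci : Char) (k fuel : Nat) : Nat :=
  match fuel with
  | 0 => k
  | fuel + 1 =>
    if 0 < k ∧ ci ≠ cs.getD k ' ' then pvShrink cs pi ci (pi.getD (k - 1) 0) fuel else k

-- one iteration of 'for i in range(1, n)' of Source B, appending pi[i]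
def pvPiStep (cs : List Char) (pi : List Nat) (i : Int) : List Nat :=
  let k0 := pi.getD (i.toNat - 1) 0
  let k1 := pvShrink cs pi (cs.getD i.toNat ' ') k0 k0
  let k2 := if cs.getD i.toNat ' ' = cs.getD k1 ' ' then k1 + 1 else k1
  pi ++ [k2]

def pvBuildPi (cs : List Char) : List Nat :=
  (PySem.List.pyRange 1 (cs.length : Int) 1).foldl (pvPiStep cs) [0]

-- 'while b > 0 and pi[b-1] > 0: b = pi[b-1]'; fuel = the initial b (b strictly decreases)
def pvDescend (pi : List Nat) (b fuel : Nat) : Nat :=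
  match fuel with
  | 0 => b
  | fuel + 1 => if 0 < pi.getD (b - 1) 0 then pvDescend pi (pi.getD (b - 1) 0) fuel else b

def clean_answer_alt (s : String) : String :=
  let token_list := (PySem.Chars.splitOn s.toList " ".toList).map String.ofList
  if token_list.length ≤ 20 then s
  else
    let cs := s.toList
    let n := cs.length
    let pi := pvBuildPi cs
    let b0 := pi.getD (n - 1) 0
    let b := pvDescend pi b0 b0
    if 0 < b ∧ b < token_list.length then PySem.Str.join " " (token_list.take b) else s

-- ===== PRECONDITION & SPEC =====
def Spec_clean_answer (s : String) (out : String) : Prop := out = clean_answer_alt s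
instance (s : String) (out : String) : Decidable (Spec_clean_answer s out) := by unfold Spec_clean_answer; infer_instance

-- ===== CLAIM (what is proved, stated in full; the proofs are below) =====
def Claim_equal_clean_answer : Prop := ∀ (s : String), Dom_clean_answer s → Spec_clean_answer s (clean_answer s)

-- ===== LEMMAS AND PROOFS =====

-- `pvBrd cs b m`: b is a (weak, possibly 0) border of the length-m prefix of cs
def pvBrd (cs : List Char) (b m : Nat) : Prop :=
  b < m ∧ ∀ j < b, cs.getD j ' ' = cs.getD (m - b + j) ' '

def pvBrdDec (cs : List Char) (b m : Nat) : Decidable (pvBrd cs b m) := by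
  unfold pvBrd; infer_instance

-- length of the longest border of the length-m prefix (0 if none)
def pvMaxb (cs : List Char) (m : Nat) : Nat :=
  @Nat.findGreatest (fun b => pvBrd cs b m) (fun b => pvBrdDec cs b m) m

theorem pvBrd_zero (cs : List Char) (m : Nat) (h : 0 < m) : pvBrd cs 0 m := by
  exact ⟨h, by omega⟩

theorem pvBrd_succ_iff (cs : List Char) (b m : Nat) :
    pvBrd cs (b + 1) (m + 1) ↔ (pvBrd cs b m ∧ cs.getD b ' ' = cs.getD m ' ') := by
  constructor
  · rintro ⟨hlt, hj⟩
    have hbm : b < m := by omega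
    refine ⟨⟨hbm, fun j hj' => ?_⟩, ?_⟩
    · have h := hj j (by omega)
      have e : m + 1 - (b + 1) + j = m - b + j := by omega
      rwa [e] at h
    · have h := hj b (by omega)
      have e : m + 1 - (b + 1) + b = m := by omega
      rwa [e] at h
  · rintro ⟨⟨hbm, hj⟩, hb⟩
    refine ⟨by omega, fun j hj' => ?_⟩
    rcases Nat.lt_or_ge j b with h | h
    · have h1 := hj j h
      have e : m + 1 - (b + 1) + j = m - b + j := by omega
      rw [e]; exact h1
    · have hjb : j = b := by omega
      subst hjb
      have e : m + 1 - (j + 1) + j = m := by omega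
      rw [e]; exact hb

theorem pvBrd_trans (cs : List Char) (a b m : Nat) (h1 : pvBrd cs a b) (h2 : pvBrd cs b m) :
    pvBrd cs a m := by
  obtain ⟨hab, hja⟩ := h1
  obtain ⟨hbm, hjb⟩ := h2
  refine ⟨by omega, fun j hj => ?_⟩
  have e1 := hja j hj
  have e2 := hjb (b - a + j) (by omega)
  have e : m - b + (b - a + j) = m - a + j := by omega
  rw [e] at e2
  exact e1.trans e2

theorem pvBrd_nest (cs : List Char) (a b m : Nat) (hab : a < b) (ha : pvBrd cs a m)
    (hb : pvBrd cs b m) : pvBrd cs a b := by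
  obtain ⟨ham, hja⟩ := ha
  obtain ⟨hbm, hjb⟩ := hb
  refine ⟨hab, fun j hj => ?_⟩
  have e1 := hja j hj
  have e2 := hjb (b - a + j) (by omega)
  have e : m - b + (b - a + j) = m - a + j := by omega
  rw [e] at e2
  exact e1.trans e2.symm

theorem pvMaxb_le (cs : List Char) (b m : Nat) (h : pvBrd cs b m) : b ≤ pvMaxb cs m := by
  unfold pvMaxb
  letI : DecidablePred fun b => pvBrd cs b m := fun b => pvBrdDec cs b m
  exact Nat.le_findGreatest (le_of_lt h.1) h

theorem pvMaxb_brd (cs : List Char) (m : Nat) (h : pvMaxb cs m ≠ 0) : pvBrd cs (pvMaxb cs m) m := by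
  unfold pvMaxb at *
  letI : DecidablePred fun b => pvBrd cs b m := fun b => pvBrdDec cs b m
  exact ((Nat.findGreatest_eq_iff).1 rfl).2.1 h

theorem pvMaxb_lt (cs : List Char) (m : Nat) (hm : 0 < m) : pvMaxb cs m < m := by
  rcases Nat.eq_zero_or_pos (pvMaxb cs m) with h | h
  · omega
  · exact (pvMaxb_brd cs m (by omega)).1

-- table invariant for a pi prefix
def pvTab (cs : List Char) (pi : List Nat) (m : Nat) : Prop :=
  pi.length = m ∧ ∀ j < m, pi.getD j 0 = pvMaxb cs (j + 1)

-- the shrink loop: result is a weak border of the length-m prefix, matches (or is 0),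
-- and dominates every matching border ≤ k
theorem pvShrink_spec (cs : List Char) (pi : List Nat) (m : Nat) (_hm : 1 ≤ m)
    (htab : pvTab cs pi m) :
    ∀ fuel k, pvBrd cs k m ∨ k = 0 → k ≤ fuel →
      (pvBrd cs (pvShrink cs pi (cs.getD m ' ') k fuel) m ∨ pvShrink cs pi (cs.getD m ' ') k fuel = 0) ∧
      pvShrink cs pi (cs.getD m ' ') k fuel ≤ k ∧
      (cs.getD m ' ' = cs.getD (pvShrink cs pi (cs.getD m ' ') k fuel) ' ' ∨
        pvShrink cs pi (cs.getD m ' ') k fuel = 0) ∧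
      (∀ b, pvBrd cs b m ∨ b = 0 → b ≤ k → cs.getD b ' ' = cs.getD m ' ' →
        (cs.getD m ' ' = cs.getD (pvShrink cs pi (cs.getD m ' ') k fuel) ' ' ∧
         b ≤ pvShrink cs pi (cs.getD m ' ') k fuel)) := by
  intro fuel
  induction fuel with
  | zero =>
    intro k hk hkf
    have hk0 : k = 0 := by omega
    subst hk0
    simp only [pvShrink]
    refine ⟨by simp, le_refl _, by simp, ?_⟩
    intro b hb hble hgb
    have hb0 : b = 0 := by omega
    subst hb0
    exact ⟨hgb.symm, le_refl _⟩
  | succ f ih =>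
    intro k hk hkf
    simp only [pvShrink]
    by_cases hcond : 0 < k ∧ cs.getD m ' ' ≠ cs.getD k ' '
    · rw [if_pos hcond]
      have hbrdk : pvBrd cs k m := by
        rcases hk with h | h
        · exact h
        · omega
      have hkm : k < m := hbrdk.1
      have hk'_eq : pi.getD (k - 1) 0 = pvMaxb cs k := by
        have := htab.2 (k - 1) (by omega)
        rwa [show k - 1 + 1 = k by omega] at this
      have hk'lt : pi.getD (k - 1) 0 < k := by
        rw [hk'_eq]; exact pvMaxb_lt cs k hcond.1
      have hk'_brd : pvBrd cs (pi.getD (k - 1) 0) m ∨ pi.getD (k - 1) 0 = 0 := by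
        rcases Nat.eq_zero_or_pos (pi.getD (k - 1) 0) with h0 | h0
        · exact Or.inr h0
        · refine Or.inl (pvBrd_trans cs _ k m ?_ hbrdk)
          rw [hk'_eq] at h0 ⊢
          exact pvMaxb_brd cs k (by omega)
      obtain ⟨ih1, ih2, ih3, ih4⟩ := ih (pi.getD (k - 1) 0) hk'_brd (by omega)
      refine ⟨ih1, by omega, ih3, ?_⟩
      intro b hb hble hgb
      have hbk : b ≠ k := by
        intro heq; subst heq
        exact hcond.2 hgb.symm
      have hbk' : b ≤ pi.getD (k - 1) 0 := by
        rcases hb with hbrdb | h0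
        · rcases Nat.eq_zero_or_pos b with hb0 | hb0
          · omega
          · have : pvBrd cs b k := pvBrd_nest cs b k m (by omega) hbrdb hbrdk
            rw [hk'_eq]
            exact pvMaxb_le cs b k this
        · omega
      exact ih4 b hb hbk' hgb
    · rw [if_neg hcond]
      have hck : k = 0 ∨ cs.getD m ' ' = cs.getD k ' ' := by
        by_cases h0 : 0 < k
        · right
          by_contra hne
          exact hcond ⟨h0, hne⟩
        · left; omega
      refine ⟨hk, le_refl _, ?_, ?_⟩
      · rcases hck with h | h
        · exact Or.inr h
        · exact Or.inl h
      · intro b hb hble hgb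
        rcases hck with h | h
        · subst h
          have hb0 : b = 0 := by omega
          subst hb0
          exact ⟨hgb.symm, le_refl _⟩
        · exact ⟨h, hble⟩

theorem pvPiStep_spec (cs : List Char) (pi : List Nat) (m : Nat) (hm : 1 ≤ m)
    (_hmn : m < cs.length) (htab : pvTab cs pi m) :
    pvPiStep cs pi (m : Int) = pi ++ [pvMaxb cs (m + 1)] := by
  unfold pvPiStep
  simp only [Int.toNat_natCast]
  have hk0_eq : pi.getD (m - 1) 0 = pvMaxb cs m := by
    have := htab.2 (m - 1) (by omega)
    rwa [show m - 1 + 1 = m by omega] at this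
  have hk0_brd : pvBrd cs (pi.getD (m - 1) 0) m ∨ pi.getD (m - 1) 0 = 0 := by
    rcases Nat.eq_zero_or_pos (pi.getD (m - 1) 0) with h0 | h0
    · exact Or.inr h0
    · rw [hk0_eq] at h0 ⊢
      exact Or.inl (pvMaxb_brd cs m (by omega))
  obtain ⟨h1, h2, h3, h4⟩ :=
    pvShrink_spec cs pi m hm htab (pi.getD (m - 1) 0) (pi.getD (m - 1) 0) hk0_brd (le_refl _)
  set r := pvShrink cs pi (cs.getD m ' ') (pi.getD (m - 1) 0) (pi.getD (m - 1) 0) with hr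
  congr 1
  by_cases hmatch : cs.getD m ' ' = cs.getD r ' '
  · rw [if_pos hmatch]
    have hrbrd : pvBrd cs r m := by
      rcases h1 with h | h
      · exact h
      · rw [h]; exact pvBrd_zero cs m (by omega)
    have hle : r + 1 ≤ pvMaxb cs (m + 1) := by
      apply pvMaxb_le
      exact (pvBrd_succ_iff cs r m).2 ⟨hrbrd, hmatch.symm⟩
    have hge : pvMaxb cs (m + 1) ≤ r + 1 := by
      rcases Nat.eq_zero_or_pos (pvMaxb cs (m + 1)) with h0 | h0
      · omega
      · have hbrdc := pvMaxb_brd cs (m + 1) (by omega)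
        obtain ⟨d, hd⟩ : ∃ d, pvMaxb cs (m + 1) = d + 1 := ⟨pvMaxb cs (m + 1) - 1, by omega⟩
        rw [hd] at hbrdc
        obtain ⟨hdbrd, hdg⟩ := (pvBrd_succ_iff cs d m).1 hbrdc
        have hdk0 : d ≤ pi.getD (m - 1) 0 := by
          rw [hk0_eq]; exact pvMaxb_le cs d m hdbrd
        have := h4 d (Or.inl hdbrd) hdk0 hdg
        omega
    simp; omega
  · rw [if_neg hmatch]
    have hr0 : r = 0 := by
      rcases h3 with h | h
      · exact absurd h hmatch
      · exact h
    have hmz : pvMaxb cs (m + 1) = 0 := by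
      by_contra h0
      have hbrdc := pvMaxb_brd cs (m + 1) h0
      obtain ⟨d, hd⟩ : ∃ d, pvMaxb cs (m + 1) = d + 1 := ⟨pvMaxb cs (m + 1) - 1, by omega⟩
      rw [hd] at hbrdc
      obtain ⟨hdbrd, hdg⟩ := (pvBrd_succ_iff cs d m).1 hbrdc
      have hdk0 : d ≤ pi.getD (m - 1) 0 := by
        rw [hk0_eq]; exact pvMaxb_le cs d m hdbrd
      have := h4 d (Or.inl hdbrd) hdk0 hdg
      exact hmatch this.1
    simp [hr0, hmz]

theorem pvMaxb_one (cs : List Char) : pvMaxb cs 1 = 0 := by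
  unfold pvMaxb
  letI : DecidablePred fun b => pvBrd cs b 1 := fun b => pvBrdDec cs b 1
  rw [Nat.findGreatest_succ]
  have : ¬ pvBrd cs 1 1 := fun h => absurd h.1 (by omega)
  simp [this]

theorem pvPyRange_self (a : Int) : PySem.List.pyRange a a = [] := by
  rw [PySem.List.pyRange_of_pos a a (by norm_num)]
  simp

theorem pvBuildPi_partial (cs : List Char) :
    ∀ m, 1 ≤ m → m ≤ cs.length →
      pvTab cs ((PySem.List.pyRange 1 (m : Int) 1).foldl (pvPiStep cs) [0]) m := by
  intro m
  induction m with
  | zero => omega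
  | succ m ih =>
    intro h1 hle
    rcases Nat.eq_zero_or_pos m with hm0 | hm0
    · subst hm0
      rw [show ((1 : Nat) : Int) = 1 by norm_num, pvPyRange_self]
      refine ⟨rfl, fun j hj => ?_⟩
      have hj0 : j = 0 := by omega
      subst hj0
      simp [pvMaxb_one]
    · have htab := ih hm0 (by omega)
      have hsplit : PySem.List.pyRange 1 ((m + 1 : Nat) : Int) 1 =
          PySem.List.pyRange 1 (m : Int) 1 ++ [(m : Int)] := by
        rw [PySem.List.pyRange_one_append 1 (m : Int) ((m + 1 : Nat) : Int) (by omega)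
          (by push_cast; omega)]
        congr 1
        rw [PySem.List.pyRange_one_cons (by push_cast; omega)]
        rw [show (m : Int) + 1 = ((m + 1 : Nat) : Int) by push_cast; ring, pvPyRange_self]
      rw [hsplit, List.foldl_append]
      simp only [List.foldl_cons, List.foldl_nil]
      rw [pvPiStep_spec cs _ m hm0 (by omega) htab]
      obtain ⟨hlen, hval⟩ := htab
      refine ⟨by simp [hlen], fun j hj => ?_⟩
      rcases Nat.lt_or_ge j m with hjm | hjm
      · rw [List.getD_append _ _ _ _ (by omega)]
        exact hval j hjm
      · have hjeq : j = m := by omega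
        subst hjeq
        rw [List.getD_append_right _ _ _ _ (by omega), hlen]
        simp

theorem pvBuildPi_spec (cs : List Char) (hn : 1 ≤ cs.length) :
    pvTab cs (pvBuildPi cs) cs.length := by
  exact pvBuildPi_partial cs cs.length hn (le_refl _)

theorem pvDescend_spec (cs : List Char) (pi : List Nat) (htab : pvTab cs pi cs.length) :
    ∀ fuel b, 0 < b → pvBrd cs b cs.length → b ≤ fuel →
      0 < pvDescend pi b fuel ∧ pvBrd cs (pvDescend pi b fuel) cs.length ∧
        pvMaxb cs (pvDescend pi b fuel) = 0 := by
  intro fuel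
  induction fuel with
  | zero => intro b hb _ hbf; omega
  | succ f ih =>
    intro b hb hbrd hbf
    simp only [pvDescend]
    have hbn : b < cs.length := hbrd.1
    have hc_eq : pi.getD (b - 1) 0 = pvMaxb cs b := by
      have := htab.2 (b - 1) (by omega)
      rwa [show b - 1 + 1 = b by omega] at this
    by_cases h0 : 0 < pi.getD (b - 1) 0
    · rw [if_pos h0]
      have hbrdc : pvBrd cs (pi.getD (b - 1) 0) cs.length := by
        refine pvBrd_trans cs _ b _ ?_ hbrd
        rw [hc_eq] at h0 ⊢
        exact pvMaxb_brd cs b (by omega)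
      have hlt : pi.getD (b - 1) 0 < b := by
        rw [hc_eq]; exact pvMaxb_lt cs b hb
      exact ih (pi.getD (b - 1) 0) h0 hbrdc (by omega)
    · rw [if_neg h0]
      exact ⟨hb, hbrd, by omega⟩

-- connect A's slice test with pvBrd
theorem pvCond_iff (cs : List Char) (L : Nat) (h1 : 1 ≤ L) (h2 : L ≤ cs.length) :
    (cs.take L = cs.drop (cs.length - L)) ↔ (L = cs.length ∨ pvBrd cs L cs.length) := by
  by_cases hL : L = cs.length
  · subst hL
    simp [List.take_length]
  · have hLlt : L < cs.length := by omega
    constructor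
    · intro h
      refine Or.inr ⟨hLlt, fun j hj => ?_⟩
      have h2 : (cs.take L)[j]? = (cs.drop (cs.length - L))[j]? := by rw [h]
      rw [List.getElem?_take, List.getElem?_drop, if_pos hj] at h2
      rw [List.getD_eq_getElem cs ' ' (by omega), List.getD_eq_getElem cs ' ' (by omega)]
      have e : cs.length - L + j = cs.length - L + j := rfl
      simp only [List.getElem?_eq_getElem (show j < cs.length by omega),
        List.getElem?_eq_getElem (show cs.length - L + j < cs.length by omega)] at h2
      exact Option.some.inj h2
    · rintro (h | ⟨hlt, hj⟩)
      · omega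
      · apply List.ext_getElem?
        intro j
        rw [List.getElem?_take, List.getElem?_drop]
        by_cases hjL : j < L
        · rw [if_pos hjL]
          have h1 := hj j hjL
          rw [List.getD_eq_getElem cs ' ' (by omega), List.getD_eq_getElem cs ' ' (by omega)] at h1
          rw [List.getElem?_eq_getElem (show j < cs.length by omega),
            List.getElem?_eq_getElem (show cs.length - L + j < cs.length by omega), h1]
        · rw [if_neg hjL]
          symm
          rw [List.getElem?_eq_none_iff]
          omega

-- the split-length lemma: len(s.split(' ')) = count(' ') + 1
theorem pvSplitOn_go_length :
    ∀ (l : List Char) (fuel : Nat) (cur : List Char) (acc : List (List Char)),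
      l.length < fuel →
      (PySem.Chars.splitOn.go [' '] fuel l cur acc).length = acc.length + l.count ' ' + 1 := by
  intro l
  induction l with
  | nil =>
    intro fuel cur acc h
    obtain ⟨f, rfl⟩ : ∃ f, fuel = f + 1 := ⟨fuel - 1, by omega⟩
    simp [PySem.Chars.splitOn.go]
  | cons c rest ih =>
    intro fuel cur acc h
    obtain ⟨f, rfl⟩ : ∃ f, fuel = f + 1 := ⟨fuel - 1, by omega⟩
    rw [PySem.Chars.splitOn.go]
    by_cases hc : c = ' '
    · subst hc
      have hpre : [' '].isPrefixOf (' ' :: rest) = true := by simp [List.isPrefixOf]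
      rw [if_pos hpre]
      have := ih f [] ((cur.reverse) :: acc) (by simp at h ⊢; omega)
      simp only [List.length_cons] at h
      simp [this]
      omega
    · have hpre : [' '].isPrefixOf (c :: rest) = false := by
        simp [List.isPrefixOf]
        exact fun hh => hc hh.symm
      rw [if_neg (by simp [hpre])]
      have := ih f (c :: cur) acc (by simp at h ⊢; omega)
      simp [this, hc]

theorem pvSplit_length (cs : List Char) :
    (PySem.Chars.splitOn cs [' ']).length = cs.count ' ' + 1 := by
  have h := pvSplitOn_go_length cs (cs.length + 1) [] [] (by omega)
  simpa [PySem.Chars.splitOn] using h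

-- A's loop test at candidate length L
def pvCondP (s : String) (L : Nat) : Prop :=
  PySem.Str.slice s none (some (L : Int)) = PySem.Str.slice s (some (-(L : Int))) none

theorem pvCondP_iff (s : String) (L : Nat) (h1 : 1 ≤ L) (h2 : L ≤ s.toList.length) :
    pvCondP s L ↔ (L = s.toList.length ∨ pvBrd s.toList L s.toList.length) := by
  unfold pvCondP
  rw [← pvCond_iff s.toList L h1 h2]
  simp only [PySem.Str.slice]
  rw [PySem.Chars.slice_eq_listSlice, PySem.Chars.slice_eq_listSlice]
  rw [PySem.List.slice_to_natCast, PySem.List.slice_from_neg_natCast _ _ (by omega)]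
  constructor
  · intro h
    have := congrArg String.toList h
    simpa using this
  · intro h
    rw [h]

theorem pvPyRange_empty (a k : Nat) (h : k ≤ a) : PySem.List.pyRange (a : Int) (k : Int) = [] := by
  rw [PySem.List.pyRange_of_pos _ _ (by norm_num : (0:Int) < 1)]
  have : ¬((a : Int) < (k : Int)) := by exact_mod_cast not_lt.2 h
  simp [this]

theorem pvGetMax_none (s : String) (k : Nat) :
    ∀ d a, 1 ≤ a → k - a ≤ d → (∀ L, a ≤ L → L < k → ¬ pvCondP s L) →
      pvGetMax s (PySem.List.pyRange (a : Int) (k : Int)) = -1 := by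
  intro d
  induction d with
  | zero =>
    intro a _ hd _
    rw [pvPyRange_empty a k (by omega)]
    rfl
  | succ d ih =>
    intro a h1 hd hfail
    rcases Nat.lt_or_ge a k with hak | hak
    · rw [PySem.List.pyRange_one_cons (by exact_mod_cast hak)]
      have hnc := hfail a (le_refl _) hak
      unfold pvCondP at hnc
      simp only [pvGetMax, if_neg hnc]
      rw [show (a : Int) + 1 = ((a + 1 : Nat) : Int) by push_cast; ring]
      exact ih (a + 1) (by omega) (by omega) (fun L hL hLk => hfail L (by omega) hLk)
    · rw [pvPyRange_empty a k hak]
      rfl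

theorem pvGetMax_found (s : String) (k r : Nat) (hrk : r < k) (hcond : pvCondP s r) :
    ∀ d a, 1 ≤ a → a ≤ r → r - a ≤ d → (∀ L, a ≤ L → L < r → ¬ pvCondP s L) →
      pvGetMax s (PySem.List.pyRange (a : Int) (k : Int)) = (r : Int) := by
  intro d
  induction d with
  | zero =>
    intro a h1 har hd _
    have : a = r := by omega
    subst this
    rw [PySem.List.pyRange_one_cons (by exact_mod_cast hrk)]
    unfold pvCondP at hcond
    simp only [pvGetMax, if_pos hcond]
  | succ d ih =>
    intro a h1 har hd hfail
    rcases Nat.lt_or_ge a r with hlt | hge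
    · rw [PySem.List.pyRange_one_cons (by exact_mod_cast (show a < k by omega))]
      have hnc := hfail a (le_refl _) hlt
      unfold pvCondP at hnc
      simp only [pvGetMax, if_neg hnc]
      rw [show (a : Int) + 1 = ((a + 1 : Nat) : Int) by push_cast; ring]
      exact ih (a + 1) (by omega) (by omega) (by omega)
        (fun L hL hLk => hfail L (by omega) hLk)
    · have : a = r := by omega
      subst this
      rw [PySem.List.pyRange_one_cons (by exact_mod_cast hrk)]
      unfold pvCondP at hcond
      simp only [pvGetMax, if_pos hcond]

-- ===== VERDICT (by name: the statement is the Claim_ definition above) =====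
theorem clean_answer_spec : Claim_equal_clean_answer := by
  intro s _hdom
  unfold Spec_clean_answer
  show clean_answer s = clean_answer_alt s
  have hL : clean_answer s =
      (if ((PySem.Chars.splitOn s.toList " ".toList).map String.ofList).length > 20 then
        (if pvGetMax s (PySem.List.pyRange 1
              ((((PySem.Chars.splitOn s.toList " ".toList).map String.ofList).length : Int)) 1) = -1
         then s
         else PySem.Str.join " " (PySem.List.slice
            ((PySem.Chars.splitOn s.toList " ".toList).map String.ofList) none
            (some (pvGetMax s (PySem.List.pyRange 1
              ((((PySem.Chars.splitOn s.toList " ".toList).map String.ofList).length : Int)) 1)))))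
       else s) := rfl
  have hR : clean_answer_alt s =
      (if ((PySem.Chars.splitOn s.toList " ".toList).map String.ofList).length ≤ 20 then s
       else
        (if 0 < pvDescend (pvBuildPi s.toList)
              ((pvBuildPi s.toList).getD (s.toList.length - 1) 0)
              ((pvBuildPi s.toList).getD (s.toList.length - 1) 0) ∧
            pvDescend (pvBuildPi s.toList)
              ((pvBuildPi s.toList).getD (s.toList.length - 1) 0)
              ((pvBuildPi s.toList).getD (s.toList.length - 1) 0) <
              ((PySem.Chars.splitOn s.toList " ".toList).map String.ofList).length
         then PySem.Str.join " " (List.take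
            (pvDescend (pvBuildPi s.toList)
              ((pvBuildPi s.toList).getD (s.toList.length - 1) 0)
              ((pvBuildPi s.toList).getD (s.toList.length - 1) 0))
            ((PySem.Chars.splitOn s.toList " ".toList).map String.ofList))
         else s)) := rfl
  rw [hL, hR]
  set t := (PySem.Chars.splitOn s.toList " ".toList).map String.ofList with ht
  set k := t.length with hk
  by_cases h20 : k > 20
  case neg => rw [if_neg h20, if_pos (by omega)]
  case pos =>
  rw [if_pos h20, if_neg (show ¬(k ≤ 20) by omega)]
  have hkc : k = s.toList.count ' ' + 1 := by
    rw [hk, ht, List.length_map, show (" ".toList) = [' '] by decide, pvSplit_length]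
  have hcl : s.toList.count ' ' ≤ s.toList.length := List.count_le_length
  have hn20 : 20 ≤ s.toList.length := by omega
  have hn1 : 1 ≤ s.toList.length := by omega
  have htab := pvBuildPi_spec s.toList hn1
  set pi := pvBuildPi s.toList with hpi
  set b0 := pi.getD (s.toList.length - 1) 0 with hb0def
  have hb0 : b0 = pvMaxb s.toList s.toList.length := by
    have := htab.2 (s.toList.length - 1) (by omega)
    rwa [show s.toList.length - 1 + 1 = s.toList.length by omega] at this
  by_cases hBpos : 0 < b0
  · have hbrd0 : pvBrd s.toList b0 s.toList.length := by
      rw [hb0]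
      exact pvMaxb_brd s.toList s.toList.length (by omega)
    obtain ⟨hrpos, hrbrd, hrmax⟩ := pvDescend_spec s.toList pi htab b0 b0 hBpos hbrd0 (le_refl _)
    set r := pvDescend pi b0 b0 with hrdef
    have hrn : r < s.toList.length := hrbrd.1
    have hrmin : ∀ c, 0 < c → pvBrd s.toList c s.toList.length → r ≤ c := by
      intro c hc hbc
      by_contra hcon
      push_neg at hcon
      have hnest := pvBrd_nest s.toList c r s.toList.length hcon hbc hrbrd
      have := pvMaxb_le s.toList c r hnest
      omega
    by_cases hrk : r < k
    · have hA : pvGetMax s (PySem.List.pyRange 1 (k : Int) 1) = (r : Int) := by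
        rw [show (1 : Int) = ((1 : Nat) : Int) by norm_num]
        apply pvGetMax_found s k r hrk
          (by rw [pvCondP_iff s r (by omega) (by omega)]; exact Or.inr hrbrd)
          r 1 (le_refl _) (by omega) (by omega)
        intro L hL hLr
        rw [pvCondP_iff s L (by omega) (by omega)]
        push_neg
        refine ⟨by omega, fun hb => ?_⟩
        have := hrmin L (by omega) hb
        omega
      rw [hA, if_neg (show ¬((r : Int) = -1) by omega),
        if_pos (show 0 < r ∧ r < k from ⟨hrpos, hrk⟩)]
      rw [PySem.List.slice_to_natCast]
    · have hA : pvGetMax s (PySem.List.pyRange 1 (k : Int) 1) = -1 := by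
        rw [show (1 : Int) = ((1 : Nat) : Int) by norm_num]
        apply pvGetMax_none s k k 1 (by omega) (by omega)
        intro L hL hLk
        rw [pvCondP_iff s L (by omega) (by omega)]
        push_neg
        refine ⟨by omega, fun hb => ?_⟩
        have := hrmin L (by omega) hb
        omega
      rw [hA, if_pos rfl, if_neg (show ¬(0 < r ∧ r < k) by omega)]
  · have hmax0 : pvMaxb s.toList s.toList.length = 0 := by omega
    have hr0 : pvDescend pi b0 b0 = 0 := by
      have hb00 : b0 = 0 := by omega
      rw [hb00]
      rfl
    have hA : pvGetMax s (PySem.List.pyRange 1 (k : Int) 1) = -1 := by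
      rw [show (1 : Int) = ((1 : Nat) : Int) by norm_num]
      apply pvGetMax_none s k k 1 (by omega) (by omega)
      intro L hL hLk
      rw [pvCondP_iff s L (by omega) (by omega)]
      push_neg
      constructor
      · intro hLn
        have hcount : s.toList.count ' ' = s.toList.length := by omega
        have hall : ∀ c ∈ s.toList, ' ' = c := List.count_eq_length.1 hcount
        have hbrd1 : pvBrd s.toList 1 s.toList.length := by
          refine ⟨by omega, fun j hj => ?_⟩
          have hj0 : j = 0 := by omega
          subst hj0
          rw [List.getD_eq_getElem s.toList ' ' (by omega),
            List.getD_eq_getElem s.toList ' ' (by omega)]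
          rw [← hall _ (List.getElem_mem _), ← hall _ (List.getElem_mem _)]
        have := pvMaxb_le s.toList 1 s.toList.length hbrd1
        omega
      · intro hb
        have := pvMaxb_le s.toList L s.toList.length hb
        omega
    rw [hA, if_pos rfl, hr0, if_neg (show ¬((0:Nat) < 0 ∧ 0 < k) by omega)]
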